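-- pv_equiv track=rewrite | github.com/pavelrevak/mpytool | mpytool/mpytool.py | _collect_flags
-- ===== SOURCE A (Python) =====
-- def _collect_flags(commands):
--     """Collect flag arguments from commands list.
--
--     Pops flags (starting with -) from commands until a non-flag is found.
--     Handles -t VALUE style arguments.
--     """
--     flags = []
--     while commands and commands[0].startswith('-'):
--         flags.append(commands.pop(0))
--         # Handle -t/--timeout VALUE style
--         if flags[-1] in ('-t', '--timeout') and commands:
--             if not commands[0].startswith('-'):
--                 flags.append(commands.pop(0))
--     return flags
-- ===== SOURCE B (Python) =====
-- def _collect_flags(commands):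
--     """Collect flag arguments from commands list (index scan + slice)."""
--     i = 0
--     n = len(commands)
--     while i < n and commands[i].startswith('-'):
--         if commands[i] in ('-t', '--timeout') and i + 1 < n and not commands[i + 1].startswith('-'):
--             i += 2
--         else:
--             i += 1
--     flags = commands[:i]
--     del commands[:i]
--     return flags
-- ===== Notes on version B (the rewrite author's own statement) =====
-- stated objective: alternative
-- what changed: B replaces A's incremental append/pop(0) loop with an index scan that first computes the consumed prefix length, then materializes the result and the in-place consumption with one slice and one del-slice.
import Mathlib
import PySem

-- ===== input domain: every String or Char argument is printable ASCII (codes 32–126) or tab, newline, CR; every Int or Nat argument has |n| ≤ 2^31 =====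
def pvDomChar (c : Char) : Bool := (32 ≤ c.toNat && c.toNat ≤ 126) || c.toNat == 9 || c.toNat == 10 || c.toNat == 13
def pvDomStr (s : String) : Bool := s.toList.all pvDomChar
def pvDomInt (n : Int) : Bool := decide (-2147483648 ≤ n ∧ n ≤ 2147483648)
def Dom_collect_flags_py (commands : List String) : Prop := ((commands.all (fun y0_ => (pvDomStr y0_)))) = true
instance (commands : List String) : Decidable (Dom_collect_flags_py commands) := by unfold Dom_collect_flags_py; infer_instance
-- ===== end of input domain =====

-- B computes the consumed prefix length by an index scan and slices once, instead of A's
-- incremental append/pop(0); equivalence is about the RETURN value only (both Pythons also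
-- consume the same prefix of `commands` in place).

-- ===== PORT A =====
-- A: loop popping from the front, appending each popped flag; extra pop after -t/--timeout
-- when the next token does not start with '-'.
def collect_flags_py : List String → List String
  | [] => []
  | c :: rest =>
    if PySem.Str.startswith c "-" then
      if c == "-t" || c == "--timeout" then
        match rest with
        | [] => [c]
        | v :: rest' =>
          if !PySem.Str.startswith v "-" then c :: v :: collect_flags_py rest'
          else c :: collect_flags_py (v :: rest')
      else c :: collect_flags_py rest
    else []

-- ===== PORT B =====
-- Source B's index scan: advance i by 2 for a -t/--timeout flag followed by a non-flag value,
-- else by 1 while the current token starts with '-'.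
def collect_flags_scan : List String → Nat
  | [] => 0
  | c :: rest =>
    if PySem.Str.startswith c "-" then
      match rest with
      | [] => 1
      | v :: rest' =>
        if (c == "-t" || c == "--timeout") && !PySem.Str.startswith v "-" then
          2 + collect_flags_scan rest'
        else 1 + collect_flags_scan (v :: rest')
    else 0

-- Source B's `commands[:i]`
def collect_flags_py_alt (commands : List String) : List String :=
  commands.take (collect_flags_scan commands)

-- ===== PRECONDITION & SPEC =====
def Spec_collect_flags_py (commands : List String) (out : List String) : Prop := out = collect_flags_py_alt commands
instance (commands : List String) (out : List String) : Decidable (Spec_collect_flags_py commands out) := by unfold Spec_collect_flags_py; infer_instance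

-- ===== CLAIM (what is proved, stated in full; the proofs are below) =====
def Claim_equal_collect_flags_py : Prop := ∀ (commands : List String), Dom_collect_flags_py commands → Spec_collect_flags_py commands (collect_flags_py commands)

-- ===== LEMMAS AND PROOFS =====
theorem collect_flags_eq_take (l : List String) :
    collect_flags_py l = l.take (collect_flags_scan l) := by
  induction l using collect_flags_py.induct with
  | case5 c rest hdash hflag ih =>
    cases rest <;> simp_all [collect_flags_py, collect_flags_scan, Nat.add_comm]
  | case6 c rest hdash =>
    cases rest <;> simp_all [collect_flags_py, collect_flags_scan]
  | _ => simp_all [collect_flags_py, collect_flags_scan, Nat.add_comm]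

-- ===== VERDICT (by name: the statement is the Claim_ definition above) =====
theorem collect_flags_py_spec : Claim_equal_collect_flags_py := by
  intro commands _
  unfold Spec_collect_flags_py collect_flags_py_alt
  exact collect_flags_eq_take commands
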